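-- pv_equiv track=rewrite | github.com/RobertVallance/adventofcode | day9.py | find_valid_and_not_valid_numbers
-- ===== SOURCE A (Python) =====
-- def find_valid_and_not_valid_numbers(numbercyphers_list, preamble_length):
--
-- 	"""
--
-- 	Find values in numbercyphers_list where a pair of numbers (within the preamble range)
-- 	fall sum to the number in numbercyphers_list under review
-- 	This function iterates through all numbers in find_valid_and_not_valid_numbers
-- 	and then calls check_if_valid_number function for each number
-- 	If a matching pair is found, add number to valid_list
-- 	Else add number to not_valid list
--
-- 	USED FOR PART 1
--
-- 	Parameters:
-- 	-----------
-- 	- numbercyphers_list (list of numbers in file)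
-- 	- preamble_length (how may numbers before the number in the list to consider)
--
--
-- 	Returns:
-- 	--------
-- 	- valid_list (list of numbers where a pair in the preamble set sum to this number)
-- 	- not_valid_list (list of numbers where a pair in the preamble set do not sum to this number)
--
-- 	"""
--
--
-- 	# initialise lists
-- 	valid_list = []
-- 	not_valid_list = []
--
-- 	# check each number in the list
-- 	# (after just considering preamble numbers where we start indexing from index preamble_length)
-- 	for i in range(preamble_length, len(numbercyphers_list)):
--
-- 		if check_if_valid_number(numbercyphers_list[i], i, numbercyphers_list, preamble_length):
-- 			valid_list.append(numbercyphers_list[i])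
-- 		else:
-- 			not_valid_list.append(numbercyphers_list[i])
--
-- 	return valid_list, not_valid_list
--
-- def check_if_valid_number(number, number_index, numbercyphers_list, preamble_length):
--
-- 	"""
--
-- 	Check if a pair of numbers in the premable set sum to the number in numbercyphers_list in question
--
-- 	USED FOR PART 1
--
-- 	Parameters:
-- 	-----------
-- 	- number (the number in numbercyphers_list being tested)
-- 	- number_index (index of number in numbercyphers_list - needed for comparsion with preamble numbers)
-- 	- preamble_length (how may numbers before the number in the list to consider)
--
-- 	Returns:
-- 	--------
-- 	- True or False (depending on whether a pair sums to the number in question)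
--
-- 	"""
--
-- 	# loop  over all pairs of preamble numbers
-- 	for j in range(number_index-preamble_length, number_index-1):
-- 		for k in range(j+1, number_index):
--
-- 			# caluclate the sum of the pair of numbers and see if it matches the number under question
-- 			sum_pair = numbercyphers_list[j] + numbercyphers_list[k]
--
-- 			if sum_pair == number:
-- 				return True
--
-- 	# only if no match found return False
-- 	return False
-- ===== SOURCE B (Python) =====
-- def _has_pair(x, window):
--     # count multiplicities once, then check complements in O(1) each
--     counts = {}
--     for v in window:
--         counts[v] = counts.get(v, 0) + 1
--     for v in window:
--         c = counts.get(x - v, 0)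
--         if c >= 2 or (c == 1 and x - v != v):
--             return True
--     return False
--
--
-- def find_valid_and_not_valid_numbers(numbercyphers_list, preamble_length):
--     valid_list = []
--     not_valid_list = []
--     for i in range(preamble_length, len(numbercyphers_list)):
--         x = numbercyphers_list[i]
--         if _has_pair(x, numbercyphers_list[i - preamble_length:i]):
--             valid_list.append(x)
--         else:
--             not_valid_list.append(x)
--     return valid_list, not_valid_list
-- ===== Notes on version B (the rewrite author's own statement) =====
-- stated objective: faster
-- what changed: Replaced the per-number nested scan over all preamble pairs with a multiplicity dictionary built once per window, so validity is decided by complement lookup (count of number-v, with the duplicate case count>=2 when number-v==v) instead of testing every pair.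
-- outside the precondition, e.g. on find_valid_and_not_valid_numbers([1, 2, 3], -1): A returns ([], [3, 1, 2, 3]), B returns ([3], [1, 2, 3])
import Mathlib
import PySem

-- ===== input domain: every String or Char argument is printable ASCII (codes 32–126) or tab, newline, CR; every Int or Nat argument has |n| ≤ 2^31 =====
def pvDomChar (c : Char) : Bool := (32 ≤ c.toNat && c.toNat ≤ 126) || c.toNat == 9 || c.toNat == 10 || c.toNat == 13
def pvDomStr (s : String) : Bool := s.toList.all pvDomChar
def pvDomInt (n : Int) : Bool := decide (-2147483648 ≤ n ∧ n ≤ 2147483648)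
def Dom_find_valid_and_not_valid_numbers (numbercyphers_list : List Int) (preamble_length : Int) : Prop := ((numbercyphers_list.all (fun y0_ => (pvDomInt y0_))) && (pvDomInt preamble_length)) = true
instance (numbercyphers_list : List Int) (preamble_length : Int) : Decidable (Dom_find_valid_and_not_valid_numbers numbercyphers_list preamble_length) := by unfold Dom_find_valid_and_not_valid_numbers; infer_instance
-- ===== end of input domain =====

-- B replaces A's nested all-pairs scan per number by a per-window multiplicity
-- dictionary and complement lookups (objective: faster, O(n*p) vs O(n*p^2)).

-- ===== PORT A =====
-- helper check_if_valid_number: early-return-True double loop = nested any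
def check_if_valid_number (number : Int) (number_index : Int) (numbercyphers_list : List Int) (preamble_length : Int) : Bool :=
  (PySem.List.pyRange (number_index - preamble_length) (number_index - 1) 1).any (fun j =>
    (PySem.List.pyRange (j + 1) number_index 1).any (fun k =>
      PySem.List.pyGetD numbercyphers_list j 0 + PySem.List.pyGetD numbercyphers_list k 0 == number))

def find_valid_and_not_valid_numbers (numbercyphers_list : List Int) (preamble_length : Int) : List Int × List Int :=
  (PySem.List.pyRange preamble_length numbercyphers_list.length 1).foldl
    (fun acc i =>
      let x := PySem.List.pyGetD numbercyphers_list i 0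
      if check_if_valid_number x i numbercyphers_list preamble_length then
        (acc.1 ++ [x], acc.2)
      else
        (acc.1, acc.2 ++ [x]))
    ([], [])

-- ===== PORT B =====
-- helper _has_pair: build a multiplicity dict of the window, then scan for a complement
def pvHasPair (x : Int) (window : List Int) : Bool :=
  let counts := window.foldl (fun d v => d.insert v (d.getD v 0 + 1)) (PySem.Dict.empty : PySem.Dict Int Int)
  window.any (fun v =>
    let c := counts.getD (x - v) 0
    (2 ≤ c) || (c == 1 && x - v != v))

def find_valid_and_not_valid_numbers_alt (numbercyphers_list : List Int) (preamble_length : Int) : List Int × List Int :=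
  (PySem.List.pyRange preamble_length numbercyphers_list.length 1).foldl
    (fun acc i =>
      let x := PySem.List.pyGetD numbercyphers_list i 0
      if pvHasPair x (PySem.List.slice numbercyphers_list (some (i - preamble_length)) (some i)) then
        (acc.1 ++ [x], acc.2)
      else
        (acc.1, acc.2 ++ [x]))
    ([], [])

-- ===== PRECONDITION & SPEC =====
-- Pre_ restricts to nonnegative preamble_length (the task's natural domain): a negative
-- preamble makes A read the list through negative-index wraparound (raising IndexError when
-- preamble_length < -len), an accident of Python indexing no caller would specify.
def Pre_find_valid_and_not_valid_numbers (numbercyphers_list : List Int) (preamble_length : Int) : Prop :=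
  0 ≤ preamble_length

instance (numbercyphers_list : List Int) (preamble_length : Int) : Decidable (Pre_find_valid_and_not_valid_numbers numbercyphers_list preamble_length) := by unfold Pre_find_valid_and_not_valid_numbers; infer_instance

def pvWitness_find_valid_and_not_valid_numbers : List Int × Int := ([35, 20, 15, 25, 47, 40, 62, 55, 65, 95], 5)

def Spec_find_valid_and_not_valid_numbers (numbercyphers_list : List Int) (preamble_length : Int) (out : List Int × List Int) : Prop := out = find_valid_and_not_valid_numbers_alt numbercyphers_list preamble_length
instance (numbercyphers_list : List Int) (preamble_length : Int) (out : List Int × List Int) : Decidable (Spec_find_valid_and_not_valid_numbers numbercyphers_list preamble_length out) := by unfold Spec_find_valid_and_not_valid_numbers; infer_instance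

-- ===== CLAIM (what is proved, stated in full; the proofs are below) =====
def Claim_equal_find_valid_and_not_valid_numbers : Prop := ∀ (numbercyphers_list : List Int) (preamble_length : Int), Dom_find_valid_and_not_valid_numbers numbercyphers_list preamble_length → Pre_find_valid_and_not_valid_numbers numbercyphers_list preamble_length → Spec_find_valid_and_not_valid_numbers numbercyphers_list preamble_length (find_valid_and_not_valid_numbers numbercyphers_list preamble_length)

-- ===== LEMMAS AND PROOFS =====

-- Both checks decide the same proposition: some pair of distinct window positions sums to x.
def pvPairProp (x : Int) (w : List Int) : Prop :=
  ∃ a b : Nat, a < b ∧ b < w.length ∧ w.getD a 0 + w.getD b 0 = x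

-- a value occurring at least twice occurs at two distinct positions
theorem pvDup_getD (w : List Int) (u : Int) (h : 2 ≤ List.count u w) :
    ∃ a b : Nat, a < b ∧ b < w.length ∧ w.getD a 0 = u ∧ w.getD b 0 = u := by
  have hd : List.Duplicate u w := List.duplicate_iff_two_le_count.mpr h
  obtain ⟨n, m, hnm, h1, h2⟩ := List.duplicate_iff_exists_distinct_get.mp hd
  refine ⟨n.1, m.1, hnm, m.2, ?_, ?_⟩
  · rw [List.getD_eq_getElem _ _ n.2]; simpa [List.get_eq_getElem] using h1.symm
  · rw [List.getD_eq_getElem _ _ m.2]; simpa [List.get_eq_getElem] using h2.symm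

-- a member of the list is a getD value at some position
theorem pvMem_getD (w : List Int) (v : Int) (h : v ∈ w) :
    ∃ a : Nat, a < w.length ∧ w.getD a 0 = v := by
  obtain ⟨n, hn, he⟩ := List.getElem_of_mem h
  exact ⟨n, hn, by rw [List.getD_eq_getElem _ _ hn]; exact he⟩

-- B's check equals the pair property on any window
theorem pvHasPair_iff (x : Int) (w : List Int) :
    pvHasPair x w = true ↔ pvPairProp x w := by
  unfold pvHasPair pvPairProp
  simp only [PySem.Dict.foldl_insert_getD_add_one_eq_counter, PySem.Dict.getD_counter,
    List.any_eq_true, Bool.or_eq_true, decide_eq_true_eq,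
    Bool.and_eq_true, beq_iff_eq, bne_iff_ne, ne_eq]
  constructor
  · rintro ⟨v, hv, hcond⟩
    by_cases hxv : x - v = v
    · have hc2 : 2 ≤ List.count (x - v) w := by
        rcases hcond with h | ⟨h, hne⟩
        · exact_mod_cast h
        · exact absurd hxv hne
      obtain ⟨a, b, hab, hb, ha', hb'⟩ := pvDup_getD w (x - v) hc2
      exact ⟨a, b, hab, hb, by rw [ha', hb']; omega⟩
    · have hc1 : x - v ∈ w := by
        have : 0 < List.count (x - v) w := by
          rcases hcond with h | ⟨h, _⟩
          · omega
          · omega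
        exact List.count_pos_iff.mp this
      obtain ⟨a, ha, ha'⟩ := pvMem_getD w v hv
      obtain ⟨b, hb, hb'⟩ := pvMem_getD w (x - v) hc1
      have hne : a ≠ b := by
        intro hh
        have hv2 : x - v = v := by rw [← hb', ← hh]; exact ha'
        exact hxv hv2
      rcases Nat.lt_or_ge a b with hlt | hge
      · exact ⟨a, b, hlt, hb, by rw [ha', hb']; ring⟩
      · have hba : b < a := lt_of_le_of_ne hge (Ne.symm hne)
        exact ⟨b, a, hba, ha, by rw [ha', hb']; ring⟩
  · rintro ⟨a, b, hab, hb, hsum⟩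
    have ha : a < w.length := lt_trans hab hb
    refine ⟨w.getD a 0, ?_, ?_⟩
    · rw [List.getD_eq_getElem _ _ ha]; exact List.getElem_mem ha
    · have hxb : x - w.getD a 0 = w.getD b 0 := by omega
      rw [hxb]
      have hmem : w.getD b 0 ∈ w := by
        rw [List.getD_eq_getElem _ _ hb]; exact List.getElem_mem hb
      have hc1 : 0 < List.count (w.getD b 0) w := List.count_pos_iff.mpr hmem
      by_cases heq : w.getD b 0 = w.getD a 0
      · left
        have hd : List.Duplicate (w.getD b 0) w := by
          rw [List.duplicate_iff_exists_distinct_get]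
          refine ⟨⟨a, ha⟩, ⟨b, hb⟩, hab, ?_, ?_⟩
          · rw [heq, List.getD_eq_getElem _ _ ha]; simp [List.get_eq_getElem]
          · rw [List.getD_eq_getElem _ _ hb]; simp [List.get_eq_getElem]
        have := List.duplicate_iff_two_le_count.mp hd
        exact_mod_cast this
      · rcases Nat.lt_or_ge (List.count (w.getD b 0) w) 2 with hsm | hlg
        · right
          refine ⟨by exact_mod_cast (show List.count (w.getD b 0) w = 1 by omega), heq⟩
        · left; exact_mod_cast hlg

-- A's check on xs between i-p and i equals the pair property of the sliced window
theorem pvCheckA_iff (xs : List Int) (p i x : Int) (hp : 0 ≤ p) (hpi : p ≤ i) (hi : i ≤ (xs.length : Int)) :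
    check_if_valid_number x i xs p = true ↔
      pvPairProp x (PySem.List.slice xs (some (i - p)) (some i)) := by
  have hbase : (0:Int) ≤ i - p := by omega
  have h0i : (0:Int) ≤ i := by omega
  rw [PySem.List.slice_toNat xs hbase h0i]
  set w := List.take (i.toNat - (i - p).toNat) (List.drop (i - p).toNat xs) with hw
  have hlen : w.length = i.toNat - (i - p).toNat := by
    rw [hw]; simp only [List.length_take, List.length_drop]; omega
  have hget : ∀ t : Nat, t < w.length → w.getD t 0 = xs.getD ((i - p).toNat + t) 0 := by
    intro t ht
    rw [hlen] at ht
    rw [hw, List.getD_eq_getElem?_getD, List.getElem?_take, List.getElem?_drop, if_pos ht,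
      List.getD_eq_getElem?_getD]
  unfold check_if_valid_number pvPairProp
  simp only [List.any_eq_true, PySem.List.mem_pyRange_one, beq_iff_eq]
  constructor
  · rintro ⟨j, ⟨hj1, hj2⟩, k, ⟨hk1, hk2⟩, hsum⟩
    refine ⟨(j - (i - p)).toNat, (k - (i - p)).toNat, by omega, by omega, ?_⟩
    rw [hget _ (by omega), hget _ (by omega)]
    have e1 : (i - p).toNat + (j - (i - p)).toNat = j.toNat := by omega
    have e2 : (i - p).toNat + (k - (i - p)).toNat = k.toNat := by omega
    rw [e1, e2, List.getD_eq_getElem _ _ (by omega), List.getD_eq_getElem _ _ (by omega)]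
    rw [PySem.List.pyGetD_eq_getElem xs 0 (by omega) (by omega),
      PySem.List.pyGetD_eq_getElem xs 0 (by omega) (by omega)] at hsum
    exact hsum
  · rintro ⟨a, b, hab, hb, hsum⟩
    have hbl : b < i.toNat - (i - p).toNat := by rw [hlen] at hb; exact hb
    refine ⟨(i - p) + a, ⟨by omega, by omega⟩, (i - p) + b, ⟨by omega, by omega⟩, ?_⟩
    have hpg : ∀ j : Int, 0 ≤ j → j < (xs.length : Int) →
        PySem.List.pyGetD xs j 0 = xs.getD j.toNat 0 := by
      intro j h0 h1
      rw [PySem.List.pyGetD_eq_getElem xs 0 h0 h1, List.getD_eq_getElem _ _ (by omega)]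
    rw [hpg _ (by omega) (by omega), hpg _ (by omega) (by omega)]
    have e1 : ((i - p) + (a : Int)).toNat = (i - p).toNat + a := by omega
    have e2 : ((i - p) + (b : Int)).toNat = (i - p).toNat + b := by omega
    rw [e1, e2, ← hget a (by omega), ← hget b (by omega)]
    exact hsum

-- ===== VERDICT (by name: the statement is the Claim_ definition above) =====
theorem find_valid_and_not_valid_numbers_spec : Claim_equal_find_valid_and_not_valid_numbers := by
  intro xs p _dom hpre
  have hp : (0:Int) ≤ p := hpre
  unfold Spec_find_valid_and_not_valid_numbers
  unfold find_valid_and_not_valid_numbers find_valid_and_not_valid_numbers_alt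
  apply PySem.List.foldl_congr_mem
  intro acc i hi
  rw [PySem.List.mem_pyRange_one] at hi
  have hcheck : check_if_valid_number (PySem.List.pyGetD xs i 0) i xs p
      = pvHasPair (PySem.List.pyGetD xs i 0) (PySem.List.slice xs (some (i - p)) (some i)) := by
    rw [Bool.eq_iff_iff, pvCheckA_iff xs p i _ hp hi.1 hi.2.le, pvHasPair_iff]
  simp only [hcheck]
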